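-- pv_equiv track=rewrite | github.com/jw9603/Python | 250326/최고의 33위치/best-place-of-33.py | max_coin_cnt
-- ===== SOURCE A (Python) =====
-- def max_coin_cnt(n, grid):
--     cnt = 0
--
--     for i in range(n - 2):
--         for j in range(n - 2):
--             mid_cnt = 0
--             for k in range(i, i + 3):
--                 for m in range(j, j + 3):
--                     mid_cnt += grid[k][m]
--             cnt = max(cnt, mid_cnt)
--
--     return cnt
-- ===== SOURCE B (Python) =====
-- def max_coin_cnt(n, grid):
--     if n < 3:
--         return 0
--     w = n - 2
--     rows = [[sum(row[j:j + 3]) for j in range(w)] for row in grid[:n]]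
--     best = 0
--     for i in range(w):
--         r0, r1, r2 = rows[i], rows[i + 1], rows[i + 2]
--         for j in range(w):
--             s = r0[j] + r1[j] + r2[j]
--             if s > best:
--                 best = s
--     return best
-- ===== Notes on version B (the rewrite author's own statement) =====
-- stated objective: faster
-- what changed: B precomputes a table of width-3 horizontal row sums once and then scans windows adding three table entries, instead of A's rescan of all 9 cells per window.
import Mathlib
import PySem

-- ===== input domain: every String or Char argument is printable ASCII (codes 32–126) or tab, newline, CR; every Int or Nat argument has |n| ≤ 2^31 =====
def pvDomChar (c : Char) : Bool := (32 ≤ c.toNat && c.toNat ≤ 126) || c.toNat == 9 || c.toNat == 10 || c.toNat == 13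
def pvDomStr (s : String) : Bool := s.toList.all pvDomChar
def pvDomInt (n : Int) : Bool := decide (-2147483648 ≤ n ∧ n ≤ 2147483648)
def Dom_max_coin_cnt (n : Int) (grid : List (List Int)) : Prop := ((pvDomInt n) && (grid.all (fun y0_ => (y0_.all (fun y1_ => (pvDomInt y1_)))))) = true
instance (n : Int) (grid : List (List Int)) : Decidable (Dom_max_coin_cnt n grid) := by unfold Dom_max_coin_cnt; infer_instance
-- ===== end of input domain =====

-- B replaces A's per-window 3×3 rescan by a precomputed table of horizontal width-3 row sums,
-- so each window costs 3 additions instead of 9 (objective: faster, constant factor).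

-- ===== PORT A =====
def max_coin_cnt (n : Int) (grid : List (List Int)) : Int :=
  (PySem.List.pyRange 0 (n - 2) 1).foldl (fun cnt i =>
    (PySem.List.pyRange 0 (n - 2) 1).foldl (fun cnt j =>
      let mid_cnt :=
        (PySem.List.pyRange i (i + 3) 1).foldl (fun acc k =>
          (PySem.List.pyRange j (j + 3) 1).foldl (fun acc m =>
            acc + PySem.List.pyGetD (PySem.List.pyGetD grid k []) m 0) acc) 0
      max cnt mid_cnt) cnt) 0

-- ===== PORT B =====
-- [sum(row[j:j+3]) for j in range(n-2)]
def pvRowWin3 (n : Int) (row : List Int) : List Int :=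
  (PySem.List.pyRange 0 (n - 2) 1).map
    (fun j => (PySem.List.slice row (some j) (some (j + 3))).sum)

def max_coin_cnt_alt (n : Int) (grid : List (List Int)) : Int :=
  if n < 3 then 0
  else
    let w := n - 2
    let rows := (PySem.List.slice grid none (some n)).map (pvRowWin3 n)
    (PySem.List.pyRange 0 w 1).foldl (fun best i =>
      let r0 := PySem.List.pyGetD rows i []
      let r1 := PySem.List.pyGetD rows (i + 1) []
      let r2 := PySem.List.pyGetD rows (i + 2) []
      (PySem.List.pyRange 0 w 1).foldl (fun best j =>
        let s := PySem.List.pyGetD r0 j 0 + PySem.List.pyGetD r1 j 0 + PySem.List.pyGetD r2 j 0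
        if s > best then s else best) best) 0

-- ===== PRECONDITION & SPEC =====
-- Pre_ excludes exactly the inputs where A raises IndexError: when n ≥ 3, A reads grid[k][m]
-- for all 0 ≤ k,m < n, so grid needs at least n rows whose first n rows each have at least n entries.
def Pre_max_coin_cnt (n : Int) (grid : List (List Int)) : Prop :=
  3 ≤ n → (n ≤ (grid.length : Int) ∧ ∀ row ∈ grid.take n.toNat, n ≤ (row.length : Int))
instance (n : Int) (grid : List (List Int)) : Decidable (Pre_max_coin_cnt n grid) := by
  unfold Pre_max_coin_cnt; infer_instance

def pvWitness_max_coin_cnt : Int × List (List Int) :=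
  (3, [[1, 2, 3], [4, 5, 6], [7, 8, 9]])

def Spec_max_coin_cnt (n : Int) (grid : List (List Int)) (out : Int) : Prop := out = max_coin_cnt_alt n grid
instance (n : Int) (grid : List (List Int)) (out : Int) : Decidable (Spec_max_coin_cnt n grid out) := by unfold Spec_max_coin_cnt; infer_instance

-- ===== CLAIM (what is proved, stated in full; the proofs are below) =====
def Claim_equal_max_coin_cnt : Prop := ∀ (n : Int) (grid : List (List Int)), Dom_max_coin_cnt n grid → Pre_max_coin_cnt n grid → Spec_max_coin_cnt n grid (max_coin_cnt n grid)

-- ===== LEMMAS AND PROOFS =====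

lemma pvRange_three (a : Int) : PySem.List.pyRange a (a + 3) 1 = [a, a + 1, a + 2] := by
  rw [PySem.List.pyRange_one_cons (by omega), PySem.List.pyRange_one_cons (by omega),
      PySem.List.pyRange_one_cons (by omega), PySem.List.pyRange_one_eq_nil (by omega)]
  have h : a + 1 + 1 = a + 2 := by ring
  rw [h]

lemma pvTake3Drop (row : List Int) (t : Nat) (h : t + 3 ≤ row.length) :
    (row.drop t).take 3 = [row[t], row[t + 1], row[t + 2]] := by
  apply List.ext_getElem
  · simp; omega
  · intro i h1 h2
    simp only [List.length_cons, List.length_nil] at h2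
    interval_cases i
    · simp
    · simp
    · simp; rfl

-- inner j-loop of A: adds the width-3 slice sum of a row
lemma pvInner (row : List Int) (n j : Int) (hn : n ≤ (row.length : Int))
    (hj : 0 ≤ j) (hj2 : j < n - 2) (acc : Int) :
    (PySem.List.pyRange j (j + 3) 1).foldl (fun acc m => acc + PySem.List.pyGetD row m 0) acc
    = acc + (PySem.List.slice row (some j) (some (j + 3))).sum := by
  have hb : j.toNat + 3 ≤ row.length := by omega
  rw [pvRange_three, PySem.List.slice_toNat row hj (by omega)]
  have h3 : (j + 3).toNat - j.toNat = 3 := by omega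
  rw [h3, pvTake3Drop row j.toNat hb]
  simp only [List.foldl, List.sum_cons, List.sum_nil]
  rw [PySem.List.pyGetD_eq_getElem row 0 hj (by omega),
      PySem.List.pyGetD_eq_getElem row 0 (show (0:Int) ≤ j + 1 by omega) (by omega),
      PySem.List.pyGetD_eq_getElem row 0 (show (0:Int) ≤ j + 2 by omega) (by omega)]
  have e1 : (j + 1).toNat = j.toNat + 1 := by omega
  have e2 : (j + 2).toNat = j.toNat + 2 := by omega
  simp only [e1, e2]
  ring_nf

-- B's lookup rows[i] is the row-window table of grid[i]
lemma pvRowsGet (n i : Int) (grid : List (List Int))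
    (hg : n ≤ (grid.length : Int)) (hi : 0 ≤ i) (hi2 : i < n) :
    PySem.List.pyGetD ((grid.take n.toNat).map (pvRowWin3 n)) i []
    = pvRowWin3 n (grid[i.toNat]'(by omega)) := by
  rw [PySem.List.pyGetD_eq_getElem _ _ hi (by simp; omega)]
  simp only [List.getElem_map, List.getElem_take]

-- B's lookup r[j] is the slice sum
lemma pvWinGet (n j : Int) (row : List Int) (hj : 0 ≤ j) (hj2 : j < n - 2) :
    PySem.List.pyGetD (pvRowWin3 n row) j 0
    = (PySem.List.slice row (some j) (some (j + 3))).sum := by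
  unfold pvRowWin3
  exact PySem.List.pyGetD_map_pyRange_of_nonneg _ _ _ _ hj hj2

lemma pvRowMem (n : Int) (grid : List (List Int)) (k : Nat)
    (hk : k < n.toNat) (hg : n ≤ (grid.length : Int))
    (hr : ∀ row ∈ grid.take n.toNat, n ≤ (row.length : Int)) :
    n ≤ ((grid[k]'(by omega)).length : Int) := by
  apply hr
  have : (grid.take n.toNat)[k]'(by simp; omega) = grid[k]'(by omega) := by
    simp [List.getElem_take]
  rw [← this]
  exact List.getElem_mem _

-- A's 3×3 window sum is the sum of three width-3 row-slice sums
lemma pvMid (n i j : Int) (grid : List (List Int))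
    (hg : n ≤ (grid.length : Int))
    (hr : ∀ row ∈ grid.take n.toNat, n ≤ (row.length : Int))
    (hi : 0 ≤ i) (hi2 : i < n - 2) (hj : 0 ≤ j) (hj2 : j < n - 2) :
    ((PySem.List.pyRange i (i + 3) 1).foldl (fun acc k =>
        (PySem.List.pyRange j (j + 3) 1).foldl (fun acc m =>
          acc + PySem.List.pyGetD (PySem.List.pyGetD grid k []) m 0) acc) 0)
    = (PySem.List.slice (grid[i.toNat]'(by omega)) (some j) (some (j + 3))).sum
      + (PySem.List.slice (grid[(i + 1).toNat]'(by omega)) (some j) (some (j + 3))).sum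
      + (PySem.List.slice (grid[(i + 2).toNat]'(by omega)) (some j) (some (j + 3))).sum := by
  have hrow : ∀ (k : Nat) (hk : k < n.toNat), n ≤ ((grid[k]'(by omega)).length : Int) :=
    fun k hk => pvRowMem n grid k hk hg hr
  rw [pvRange_three i]
  simp only [List.foldl]
  rw [PySem.List.pyGetD_eq_getElem grid [] hi (by omega),
      PySem.List.pyGetD_eq_getElem grid [] (show (0:Int) ≤ i + 1 by omega) (by omega),
      PySem.List.pyGetD_eq_getElem grid [] (show (0:Int) ≤ i + 2 by omega) (by omega)]
  have h0 : n ≤ (((grid[i.toNat]'(by omega) : List Int)).length : Int) := hrow i.toNat (by omega)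
  have h1 : n ≤ (((grid[(i + 1).toNat]'(by omega) : List Int)).length : Int) := hrow (i + 1).toNat (by omega)
  have h2 : n ≤ (((grid[(i + 2).toNat]'(by omega) : List Int)).length : Int) := hrow (i + 2).toNat (by omega)
  rw [pvInner _ n j h0 hj hj2, pvInner _ n j h1 hj hj2, pvInner _ n j h2 hj hj2]
  ring

-- ===== VERDICT (by name: the statement is the Claim_ definition above) =====
theorem max_coin_cnt_spec : Claim_equal_max_coin_cnt := by
  intro n grid _ hpre
  unfold Spec_max_coin_cnt max_coin_cnt max_coin_cnt_alt
  by_cases hn : n < 3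
  · rw [if_pos hn, PySem.List.pyRange_one_eq_nil (by omega)]
    rfl
  · rw [if_neg hn]
    simp only []
    have hn3 : 3 ≤ n := by omega
    obtain ⟨hg, hr⟩ := hpre hn3
    have hmax : ∀ a b : Int, max a b = if b > a then b else a := by
      intro a b
      by_cases h : b ≤ a
      · rw [max_eq_left h, if_neg (by omega)]
      · rw [max_eq_right (by omega), if_pos (by omega)]
    rw [PySem.List.slice_to grid (show (0:Int) ≤ n by omega)]
    apply PySem.List.foldl_congr_mem
    intro cnt i hi
    rw [PySem.List.mem_pyRange_one] at hi
    rw [pvRowsGet n i grid hg hi.1 (by omega),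
        pvRowsGet n (i + 1) grid hg (by omega) (by omega),
        pvRowsGet n (i + 2) grid hg (by omega) (by omega)]
    apply PySem.List.foldl_congr_mem
    intro best j hj
    rw [PySem.List.mem_pyRange_one] at hj
    rw [pvWinGet n j _ hj.1 hj.2, pvWinGet n j _ hj.1 hj.2, pvWinGet n j _ hj.1 hj.2]
    rw [pvMid n i j grid hg hr hi.1 hi.2 hj.1 hj.2]
    exact hmax best _
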